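-- pv_equiv track=rewrite | github.com/osnatairy/minimal_separators_project | validation/set_utils.py | sort_and_dedup_subsets
-- ===== SOURCE A (Python) =====
-- from typing import Iterable, List, Tuple
--
-- def sort_and_dedup_subsets(raw_sets: Iterable[Iterable]) -> List[List[str]]:
--     """
--     קלט: raw_sets - iterable של איטרבלים (למשל רשימות של תווים/שמות)
--     פלט: רשימת רשימות ממויינת:
--       - כל תת-רשימה ממוינת (sorted)
--       - הרשימה ממוינת לפי (|subset|, lexicographic tuple)
--       - כפילויות מוסרות (שמור על first-seen order לפני המיון)
--     """
--     # 1) נרמול: המרת כל אלמנט לטאפל של איברים ממוינים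
--     normalized = [tuple(sorted(map(str, s))) for s in raw_sets]
--
--     # 2) הסרת כפילויות תוך שמירה על סדר הופעה ראשון
--     seen = {}
--     uniq = []
--     for t in normalized:
--         if t not in seen:
--             seen[t] = True
--             uniq.append(t)
--
--     # 3) מיון לפי (גודל, סדר לקסיקוגרפי)
--     uniq.sort(key=lambda t: (len(t), t))
--
--     # 4) החזרה כרשימת רשימות (ממוינות בתוך וכל אחת ממוינת כבר)
--     return [list(t) for t in uniq]
-- ===== SOURCE B (Python) =====
-- from typing import Iterable, List
--
--
-- def sort_and_dedup_subsets(raw_sets: Iterable[Iterable]) -> List[List[str]]: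
--     # Normalize exactly as before, then sort EVERYTHING (duplicates included)
--     # by (size, lexicographic) and drop duplicates in one adjacent-compare pass:
--     # equal tuples are adjacent after sorting, so no hash set is needed.
--     normalized = sorted(
--         (tuple(sorted(map(str, s))) for s in raw_sets),
--         key=lambda t: (len(t), t),
--     )
--     result = []
--     for t in normalized:
--         if not result or result[-1] != t:
--             result.append(t)
--     return [list(t) for t in result]
-- ===== Notes on version B (the rewrite author's own statement) =====
-- stated objective: alternative
-- what changed: Replaces the seen-dict first-seen dedup followed by sorting the unique list with sorting the full normalized list first and removing duplicates in a single adjacent-compare pass over the sorted list (no hash set); the (len, tuple) key is injective, so the output is identical.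
import Mathlib
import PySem

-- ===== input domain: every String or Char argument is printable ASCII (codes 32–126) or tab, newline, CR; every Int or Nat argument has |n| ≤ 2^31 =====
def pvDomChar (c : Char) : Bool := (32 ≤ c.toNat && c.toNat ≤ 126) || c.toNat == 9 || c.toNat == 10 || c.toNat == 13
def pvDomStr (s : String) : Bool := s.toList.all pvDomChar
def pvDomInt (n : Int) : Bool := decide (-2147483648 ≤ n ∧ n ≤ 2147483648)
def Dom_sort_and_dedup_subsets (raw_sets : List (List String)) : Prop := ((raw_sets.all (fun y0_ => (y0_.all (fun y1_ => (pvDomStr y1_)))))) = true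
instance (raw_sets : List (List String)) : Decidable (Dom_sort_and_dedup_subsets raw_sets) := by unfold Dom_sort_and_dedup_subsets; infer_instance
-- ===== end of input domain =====

set_option maxRecDepth 8000


-- B replaces A's seen-dict first-seen dedup + sort of the unique list by sorting the
-- full normalized list and removing duplicates in one adjacent-compare pass (alternative
-- decomposition, same output since the (len, tuple) sort key is injective).

-- ===== PORT A =====
-- A's dedup loop carries the pair (seen dict, uniq list); str(x) on a str is x itself.
def sort_and_dedup_subsets (raw_sets : List (List String)) : List (List String) :=
  let normalized := raw_sets.map (fun s => PySem.List.sorted (s.map (fun x => x)) (fun x => x) false)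
  let st := normalized.foldl
    (fun (st : PySem.Dict (List String) Bool × List (List String)) t =>
      if st.1.contains t then st else (st.1.insert t true, st.2 ++ [t]))
    (PySem.Dict.empty, [])
  let uniq := PySem.List.sorted2 st.2 (fun t => (t.length : Int)) (fun t => t) false
  uniq.map (fun t => t)

-- ===== PORT B =====
-- B sorts the full normalized list by (len, tuple) and drops adjacent duplicates.
def sort_and_dedup_subsets_alt (raw_sets : List (List String)) : List (List String) :=
  let normalized := PySem.List.sorted2
    (raw_sets.map (fun s => PySem.List.sorted (s.map (fun x => x)) (fun x => x) false))
    (fun t => (t.length : Int)) (fun t => t) false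
  let result := normalized.foldl
    (fun (res : List (List String)) t =>
      if res = [] ∨ res.getLast? ≠ some t then res ++ [t] else res) []
  result.map (fun t => t)

-- ===== PRECONDITION & SPEC =====
def Spec_sort_and_dedup_subsets (raw_sets : List (List String)) (out : List (List String)) : Prop := out = sort_and_dedup_subsets_alt raw_sets
instance (raw_sets : List (List String)) (out : List (List String)) : Decidable (Spec_sort_and_dedup_subsets raw_sets out) := by unfold Spec_sort_and_dedup_subsets; infer_instance

-- ===== CLAIM (what is proved, stated in full; the proofs are below) =====
def Claim_equal_sort_and_dedup_subsets : Prop := ∀ (raw_sets : List (List String)), Dom_sort_and_dedup_subsets raw_sets → Spec_sort_and_dedup_subsets raw_sets (sort_and_dedup_subsets raw_sets)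

-- ===== LEMMAS AND PROOFS =====

-- the sort key of both programs, as a single lexicographic key
def pvKey (t : List String) : Lex (Int × List String) := toLex ((t.length : Int), t)

theorem pvKey_inj {a b : List String} (h : pvKey a = pvKey b) : a = b := by
  have := congrArg (fun p => (ofLex p).2) h
  simpa [pvKey] using this

-- sorted2 with keys (len, id) is sorted with the corresponding lexicographic key
theorem pv_sorted2_eq_sorted (xs : List (List String)) :
    PySem.List.sorted2 xs (fun t => (t.length : Int)) (fun t => t) false
      = PySem.List.sorted xs (fun t => (toLex ((t.length : Int), t) : Lex (Int × List String))) false := by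
  rw [PySem.List.sorted_eq_foldl_insertBy]
  have hcmp : (fun a b : List String => decide ((a.length : Int) < (b.length : Int)) || (!decide ((b.length : Int) < (a.length : Int)) && decide (a < b)))
      = (fun a b : List String => decide ((toLex ((a.length : Int), a) : Lex (Int × List String)) < toLex ((b.length : Int), b))) := by
    funext a b
    rcases lt_trichotomy ((a.length : Int)) ((b.length : Int)) with h | h | h
    · simp [Prod.Lex.lt_iff, h]
    · simp [Prod.Lex.lt_iff, h]
    · have h' : b.length < a.length := by exact_mod_cast h
      simp [Prod.Lex.lt_iff, h, not_lt_of_gt h]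
      intro heq
      exact absurd heq (by omega)
  simp only [PySem.List.sorted2, hcmp]
  rfl

-- A's seen-dict loop builds exactly the first-occurrence set of its input
theorem pv_loopA (N : List (List String)) (seen : PySem.Dict (List String) Bool)
    (uniq : List (List String)) (h : ∀ t, seen.contains t = uniq.contains t) :
    (N.foldl (fun (st : PySem.Dict (List String) Bool × List (List String)) t =>
        if st.1.contains t then st else (st.1.insert t true, st.2 ++ [t])) (seen, uniq)).2
      = N.foldl PySem.Set.add uniq := by
  induction N generalizing seen uniq with
  | nil => rfl
  | cons t N ih =>
    by_cases hc : seen.contains t = true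
    · have hu : uniq.contains t = true := by rw [← h]; exact hc
      simp only [List.foldl_cons, hc, if_pos, PySem.Set.add, PySem.Set.contains, hu]
      exact ih seen uniq h
    · have hu : uniq.contains t = false := by rw [← h]; simpa using hc
      simp only [List.foldl_cons, hc, PySem.Set.add, PySem.Set.contains, hu,
        Bool.false_eq_true, reduceIte]
      exact ih _ _ (by
        intro t'
        rw [PySem.Dict.contains_insert, h t']
        cases hq : t' == t <;> simp_all)

-- every member of a list is in its dropLast or is its last element
theorem pv_mem_dropLast_or {α : Type} (l : List α) (a : α) (ha : a ∈ l) :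
    a ∈ l.dropLast ∨ l.getLast? = some a := by
  induction l with
  | nil => cases ha
  | cons x t ih =>
    cases t with
    | nil => simp at ha; simp [ha]
    | cons y t' =>
      rcases List.mem_cons.mp ha with rfl | hmem
      · simp
      · rcases ih hmem with h | h
        · left; simpa using Or.inr h
        · right; simpa using h

-- B's adjacent-compare pass: on a (≤)-sorted input it yields a strictly
-- increasing list with the same members
theorem pv_scan (S : List (List String)) : ∀ (acc : List (List String)),
    S.Pairwise (fun a b => pvKey a ≤ pvKey b) →
    acc.Pairwise (fun a b => pvKey a < pvKey b) →
    (∀ a ∈ acc, ∀ s ∈ S, pvKey a ≤ pvKey s) →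
    (∀ a ∈ acc.dropLast, ∀ s ∈ S, pvKey a < pvKey s) →
    (S.foldl (fun (res : List (List String)) t =>
        if res = [] ∨ res.getLast? ≠ some t then res ++ [t] else res) acc).Pairwise
        (fun a b => pvKey a < pvKey b)
    ∧ ∀ x, x ∈ (S.foldl (fun (res : List (List String)) t =>
        if res = [] ∨ res.getLast? ≠ some t then res ++ [t] else res) acc) ↔ x ∈ acc ∨ x ∈ S := by
  induction S with
  | nil => intro acc _ hacc _ _; exact ⟨hacc, by simp⟩
  | cons t S ih =>
    intro acc hS hacc hlast hdrop
    have hS' := (List.pairwise_cons.mp hS).2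
    have hS1 : ∀ s ∈ S, pvKey t ≤ pvKey s := (List.pairwise_cons.mp hS).1
    by_cases hc : acc = [] ∨ acc.getLast? ≠ some t
    · -- append t
      have hlt : ∀ a ∈ acc, pvKey a < pvKey t := by
        intro a ha
        have hle := hlast a ha t (List.mem_cons_self ..)
        rcases lt_or_eq_of_le hle with h | h
        · exact h
        · exfalso
          have : a = t := pvKey_inj h
          subst this
          rcases pv_mem_dropLast_or acc a ha with hd | hl
          · exact absurd (hdrop a hd a (List.mem_cons_self ..)) (lt_irrefl _)
          · rcases hc with h0 | hne
            · subst h0; cases ha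
            · exact hne hl
      simp only [List.foldl_cons, if_pos hc]
      have := ih (acc ++ [t]) hS'
        (by
          rw [List.pairwise_append]
          exact ⟨hacc, List.pairwise_singleton _ _, by
            intro a ha b hb; simp at hb; subst hb; exact hlt a ha⟩)
        (by
          intro a ha s hs
          rcases List.mem_append.mp ha with ha | ha
          · exact le_of_lt (lt_of_lt_of_le (hlt a ha) (hS1 s hs))
          · simp at ha; subst ha; exact hS1 s hs)
        (by
          intro a ha s hs
          rw [List.dropLast_concat] at ha
          exact lt_of_lt_of_le (hlt a ha) (hS1 s hs))
      refine ⟨this.1, ?_⟩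
      intro x
      rw [(this.2 x)]
      simp only [List.mem_append, List.mem_cons]
      tauto
    · -- skip t: it equals acc's last element
      have hc' := hc
      push Not at hc'
      obtain ⟨hne, hlastt⟩ := hc'
      have htacc : t ∈ acc := List.mem_of_getLast? hlastt
      simp only [List.foldl_cons, if_neg hc]
      have := ih acc hS' hacc
        (by
          intro a ha s hs
          exact le_trans (hlast a ha t (List.mem_cons_self ..)) (hS1 s hs))
        (by
          intro a ha s hs
          exact lt_of_lt_of_le (hdrop a ha t (List.mem_cons_self ..)) (hS1 s hs))
      refine ⟨this.1, ?_⟩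
      intro x
      rw [this.2 x]
      constructor
      · rintro (h | h)
        · exact Or.inl h
        · exact Or.inr (List.mem_cons_of_mem _ h)
      · rintro (h | h)
        · exact Or.inl h
        · rcases List.mem_cons.mp h with rfl | h
          · exact Or.inl htacc
          · exact Or.inr h

-- ===== VERDICT (by name: the statement is the Claim_ definition above) =====
theorem sort_and_dedup_subsets_spec : Claim_equal_sort_and_dedup_subsets := by
  intro raw_sets _
  unfold Spec_sort_and_dedup_subsets sort_and_dedup_subsets sort_and_dedup_subsets_alt
  set N := raw_sets.map (fun s => PySem.List.sorted (s.map (fun x => x)) (fun x => x) false) with hN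
  simp only [List.map_id']
  -- A side: the dict loop is Set.ofList
  have hA : (N.foldl (fun (st : PySem.Dict (List String) Bool × List (List String)) t =>
      if st.1.contains t then st else (st.1.insert t true, st.2 ++ [t]))
      (PySem.Dict.empty, ([] : List (List String)))).2 = PySem.Set.ofList N := by
    rw [PySem.Set.ofList_eq_foldl]
    exact pv_loopA N _ _ (by intro t; rw [PySem.Dict.contains_empty]; rfl)
  rw [hA, pv_sorted2_eq_sorted, pv_sorted2_eq_sorted]
  -- B side: the adjacent scan of the sorted list
  have hscan := pv_scan (PySem.List.sorted N (fun t => toLex ((t.length : Int), t)) false) []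
    (by simpa [pvKey] using PySem.List.sorted_pairwise N (fun t => toLex ((t.length : Int), t)))
    (List.Pairwise.nil) (by simp) (by simp)
  set R := (PySem.List.sorted N (fun t => toLex ((t.length : Int), t)) false).foldl
    (fun (res : List (List String)) t =>
      if res = [] ∨ res.getLast? ≠ some t then res ++ [t] else res) [] with hR
  have hnodupR : R.Nodup := by
    refine List.Pairwise.imp ?_ hscan.1
    intro a b h hab
    subst hab
    exact lt_irrefl _ h
  have hmemR : ∀ x, x ∈ R ↔ x ∈ PySem.Set.ofList N := by
    intro x
    rw [hscan.2 x, PySem.Set.mem_ofList]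
    simp [PySem.List.mem_sorted]
  refine PySem.List.sorted_eq_of_perm_of_pairwise_lt _ R _ ?_ ?_
  · exact (List.perm_ext_iff_of_nodup hnodupR (PySem.Set.nodup_ofList N)).mpr hmemR
  · simpa [pvKey] using hscan.1
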